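-- pv_equiv track=rewrite | github.com/dawson-teu/Competitive_Programming_Solutions | Contests/DMOPC/2014/C1_P5_Suprise_Teleport.py | bfs
-- ===== SOURCE A (Python) =====
-- def neighbours(pos, graph, n_row, n_col):
--     neighbour_list = []
--     neighbour_positions = [(1, 0), (0, 1), (-1, 0), (0, -1)]
--     for position in neighbour_positions:
--         n_pos = [position[0] + pos[0], position[1] + pos[1]]
--         if 0 <= n_pos[1] < n_col and 0 <= n_pos[0] < n_row and not graph[n_pos[0]][n_pos[1]] == 'X':
--             neighbour_list.append(n_pos)
--     return neighbour_list
--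
-- def index_2d_to_1d(position, num_col):
--     return position[1] + position[0] * num_col
--
-- def bfs(source, target, graph, teleports, num_row, num_col):
--     queue = []
--     visited = set()
--     queue.append(source)
--
--     dist = {}
--     min_teleport_dist = -1
--     while len(queue) > 0:
--         position = queue.pop(0)
--         if position == target and min_teleport_dist == -1:
--             return 0
--         elif position == target:
--             return dist[index_2d_to_1d(position, num_col)] - min_teleport_dist
--
--         if index_2d_to_1d(position, num_col) in teleports and min_teleport_dist == -1:
--             if index_2d_to_1d(position, num_col) in dist:
--                 min_teleport_dist = dist[index_2d_to_1d(position, num_col)]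
--             else:
--                 min_teleport_dist = 0
--         for neighbour in neighbours(position, graph, num_row, num_col):
--             if index_2d_to_1d(neighbour, num_col) not in visited:
--                 if index_2d_to_1d(position, num_col) not in dist:
--                     dist[index_2d_to_1d(neighbour, num_col)] = 1
--                 else:
--                     dist[index_2d_to_1d(neighbour, num_col)] = dist[index_2d_to_1d(position, num_col)] + 1
--                 visited.add(index_2d_to_1d(neighbour, num_col))
--                 queue.append(neighbour)
-- ===== SOURCE B (Python) =====
-- def bfs(source, target, graph, teleports, num_row, num_col):
--     # Exhaustive BFS trace + post-scan instead of A's interleaved early-exit loop.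
--     # Phase 1: full BFS over the component of source (cursor instead of pop(0)),
--     # recording the pop order and the distance of every cell first reached.
--     order = []
--     dist = {}
--     visited = set()
--     queue = [source]
--     head = 0
--     while head < len(queue):
--         pos = queue[head]
--         head += 1
--         order.append(pos)
--         d = dist.get(pos[1] + pos[0] * num_col, 0)
--         for dr, dc in ((1, 0), (0, 1), (-1, 0), (0, -1)):
--             nr, nc = dr + pos[0], dc + pos[1]
--             if 0 <= nc < num_col and 0 <= nr < num_row and graph[nr][nc] != 'X':
--                 i = nc + nr * num_col
--                 if i not in visited:
--                     visited.add(i)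
--                     dist[i] = d + 1
--                     queue.append([nr, nc])
--     # Phase 2: scan the recorded order.
--     if target not in order:
--         return None
--     k = order.index(target)
--     m = None
--     for p in order[:k]:
--         if p[1] + p[0] * num_col in teleports:
--             m = 0 if p == source else dist[p[1] + p[0] * num_col]
--             break
--     if m is None:
--         return 0
--     return dist[target[1] + target[0] * num_col] - m
-- ===== Notes on version B (the rewrite author's own statement) =====
-- stated objective: alternative
-- what changed: A interleaves the target test and first-teleport capture inside a single early-exit BFS loop with list.pop(0); B first runs the BFS to exhaustion over the whole reachable component with a cursor-indexed queue, recording the pop order and distance map, and then computes the answer by a separate pure scan of the recorded order (find target, find first teleport before it).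
-- outside the precondition, e.g. on bfs([], [], [['.']], set(), 1, 1): A returns 0, B raises IndexError; on bfs([0, 0], [0, 0], [], set(), 2, 1): A returns 0, B raises IndexError
import Mathlib
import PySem

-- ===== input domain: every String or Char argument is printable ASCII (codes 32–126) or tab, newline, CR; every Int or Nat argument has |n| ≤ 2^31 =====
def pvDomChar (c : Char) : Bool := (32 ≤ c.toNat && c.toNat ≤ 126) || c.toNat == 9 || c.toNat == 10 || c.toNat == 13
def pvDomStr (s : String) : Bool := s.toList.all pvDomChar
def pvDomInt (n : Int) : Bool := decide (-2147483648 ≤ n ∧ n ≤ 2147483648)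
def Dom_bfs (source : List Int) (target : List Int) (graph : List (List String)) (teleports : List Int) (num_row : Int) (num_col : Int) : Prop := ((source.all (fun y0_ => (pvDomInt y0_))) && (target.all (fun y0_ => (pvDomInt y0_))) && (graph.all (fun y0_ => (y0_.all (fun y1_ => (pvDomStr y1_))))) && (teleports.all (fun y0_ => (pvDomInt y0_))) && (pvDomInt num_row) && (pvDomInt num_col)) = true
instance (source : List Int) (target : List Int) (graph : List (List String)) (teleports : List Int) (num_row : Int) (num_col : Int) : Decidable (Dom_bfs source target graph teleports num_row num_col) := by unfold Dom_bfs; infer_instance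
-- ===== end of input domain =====

-- B replaces A's single interleaved early-exit BFS loop by an exhaustive BFS trace (cursor queue)
-- followed by a pure post-scan of the recorded pop order; return values agree on Pre_bfs.

-- ===== PORT A =====
-- index_2d_to_1d(position, num_col); exact for positions of length ≥ 2 (all positions under Pre_bfs)
def pvIdxA (pos : List Int) (num_col : Int) : Int :=
  PySem.List.pyGetD pos 1 0 + PySem.List.pyGetD pos 0 0 * num_col

-- graph[r][c]; exact when 0 ≤ r < num_row ≤ |graph| and 0 ≤ c < num_col ≤ |row| (guaranteed under Pre_bfs)
def pvCellA (graph : List (List String)) (r c : Int) : String :=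
  PySem.List.pyGetD (PySem.List.pyGetD graph r []) c ""

-- neighbours(pos, graph, n_row, n_col): the for-loop over the four offsets, appending
def pvNeighboursA (pos : List Int) (graph : List (List String)) (n_row n_col : Int) : List (List Int) :=
  [((1:Int),(0:Int)), (0,1), (-1,0), (0,-1)].foldl (fun acc p =>
    let nr := p.1 + PySem.List.pyGetD pos 0 0
    let nc := p.2 + PySem.List.pyGetD pos 1 0
    if 0 ≤ nc ∧ nc < n_col ∧ 0 ≤ nr ∧ nr < n_row ∧ (pvCellA graph nr nc == "X") = false then
      acc ++ [[nr, nc]] else acc) []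

-- the while-loop of A; fuel bounds the number of pops (≤ 1 + num_row*num_col enqueues, see comment at bfs)
def pvLoopA (source : List Int) (target : List Int) (graph : List (List String)) (teleports : List Int)
    (num_row num_col : Int) :
    Nat → List (List Int) → PySem.Set Int → PySem.Dict Int Int → Int → Option Int
  | 0, _, _, _, _ => none
  | _+1, [], _, _, _ => none
  | f+1, position :: rest, visited, dist, mtd =>
    if position == target then
      (if mtd == -1 then some 0
       -- dist[index_2d_to_1d(position, num_col)]: the key is always present when this branch runs
       -- (mtd ≠ -1 forces a previous iteration, so position was enqueued with its dist written)
       else some (dist.getD (pvIdxA position num_col) 0 - mtd))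
    else
      -- Python's locals k = index_2d_to_1d(position, num_col) and i = index_2d_to_1d(neighbour, num_col)
      -- are written out at each use, exactly as A recomputes them
      let mtd' := if teleports.contains (pvIdxA position num_col) && (mtd == -1) then
          (if dist.contains (pvIdxA position num_col) then dist.getD (pvIdxA position num_col) 0 else 0) else mtd
      let st := (pvNeighboursA position graph num_row num_col).foldl
        (fun (st : List (List Int) × PySem.Set Int × PySem.Dict Int Int) nb =>
          if st.2.1.contains (pvIdxA nb num_col) then st
          else (st.1 ++ [nb], st.2.1.add (pvIdxA nb num_col),
                st.2.2.insert (pvIdxA nb num_col)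
                  (if st.2.2.contains (pvIdxA position num_col) then st.2.2.getD (pvIdxA position num_col) 0 + 1 else 1)))
        (rest, visited, dist)
      pvLoopA source target graph teleports num_row num_col f st.1 st.2.1 st.2.2 mtd'

def bfs (source : List Int) (target : List Int) (graph : List (List String)) (teleports : List Int) (num_row : Int) (num_col : Int) : Option Int :=
  -- fuel: the loop pops at most 1 + (#insertions into visited) ≤ 1 + num_row*num_col times,
  -- so this fuel is never exhausted on a real run; it only makes the recursion structural
  pvLoopA source target graph teleports num_row num_col
    (num_row.toNat * num_col.toNat + 2) [source] PySem.Set.empty PySem.Dict.empty (-1)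

-- ===== PORT B =====
-- inline expression pos[1] + pos[0] * num_col of Source B, factored for readability; exact for length-2 positions
def pvIdxB (pos : List Int) (num_col : Int) : Int :=
  PySem.List.pyGetD pos 1 0 + PySem.List.pyGetD pos 0 0 * num_col

-- graph[nr][nc] of Source B; exact under the same bounds as pvCellA
def pvCellB (graph : List (List String)) (r c : Int) : String :=
  PySem.List.pyGetD (PySem.List.pyGetD graph r []) c ""

-- the tuple ((1,0),(0,1),(-1,0),(0,-1)) of Source B
def pvDeltasB : List (Int × Int) := [(1,0),(0,1),(-1,0),(0,-1)]

-- phase 1 of Source B: exhaustive BFS with a cursor `head`, returning (pop order, dist);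
-- `order.append(pos)` becomes the `pos :: …` accumulation; same fuel remark as for pvLoopA
def pvLoopB (graph : List (List String)) (num_row num_col : Int) :
    Nat → List (List Int) → Nat → PySem.Set Int → PySem.Dict Int Int →
    (List (List Int) × PySem.Dict Int Int)
  | 0, _, _, _, dist => ([], dist)
  | f+1, queue, head, visited, dist =>
    match queue[head]? with   -- while head < len(queue): pos = queue[head]
    | none => ([], dist)
    | some pos =>
      let d := dist.getD (pvIdxB pos num_col) 0
      -- Python's locals nr, nc, i are written out at each use
      let st := pvDeltasB.foldl
        (fun (st : List (List Int) × PySem.Set Int × PySem.Dict Int Int) dd =>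
          if 0 ≤ dd.2 + PySem.List.pyGetD pos 1 0 ∧ dd.2 + PySem.List.pyGetD pos 1 0 < num_col ∧
              0 ≤ dd.1 + PySem.List.pyGetD pos 0 0 ∧ dd.1 + PySem.List.pyGetD pos 0 0 < num_row ∧
              (pvCellB graph (dd.1 + PySem.List.pyGetD pos 0 0) (dd.2 + PySem.List.pyGetD pos 1 0) == "X") = false then
            (if st.2.1.contains ((dd.2 + PySem.List.pyGetD pos 1 0) + (dd.1 + PySem.List.pyGetD pos 0 0) * num_col) then st
             else (st.1 ++ [[dd.1 + PySem.List.pyGetD pos 0 0, dd.2 + PySem.List.pyGetD pos 1 0]],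
                   st.2.1.add ((dd.2 + PySem.List.pyGetD pos 1 0) + (dd.1 + PySem.List.pyGetD pos 0 0) * num_col),
                   st.2.2.insert ((dd.2 + PySem.List.pyGetD pos 1 0) + (dd.1 + PySem.List.pyGetD pos 0 0) * num_col) (d + 1)))
          else st)
        (queue, visited, dist)
      let r := pvLoopB graph num_row num_col f st.1 (head+1) st.2.1 st.2.2
      (pos :: r.1, r.2)

def bfs_alt (source : List Int) (target : List Int) (graph : List (List String)) (teleports : List Int) (num_row : Int) (num_col : Int) : Option Int :=
  let r := pvLoopB graph num_row num_col
    (num_row.toNat * num_col.toNat + 2) [source] 0 PySem.Set.empty PySem.Dict.empty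
  -- phase 2 of Source B: `if target not in order: return None; k = order.index(target)` is index?
  match PySem.List.index? r.1 target with
  | none => none
  | some k =>
    -- first teleport in order[:k] (the for/break loop)
    match (r.1.take k).find? (fun p => teleports.contains (pvIdxB p num_col)) with
    | none => some 0
    | some p =>
      -- dist[...] lookups: keys present whenever this branch runs (p ≠ source was enqueued; k ≥ 1 so target was enqueued)
      some (r.2.getD (pvIdxB target num_col) 0 -
            (if p == source then 0 else r.2.getD (pvIdxB p num_col) 0))

-- ===== PRECONDITION & SPEC =====
-- Pre_bfs excludes inputs where Python A raises IndexError (a source with fewer than two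
-- coordinates, or a grid access beyond the actual lists); A still returns on corners where
-- source == target is popped before any indexing happens - those are cited in claim.json.
-- Admitted: a complete num_row x num_col grid, a degenerate grid (num_row <= 0 or num_col <= 0),
-- or a source none of whose four neighbours is in bounds (the grid is never indexed then).
def Pre_bfs (source : List Int) (target : List Int) (graph : List (List String)) (teleports : List Int) (num_row : Int) (num_col : Int) : Prop :=
  2 ≤ source.length ∧
  (num_row ≤ 0 ∨ num_col ≤ 0
   ∨ (num_row ≤ (graph.length : Int) ∧ ∀ row ∈ graph, num_col ≤ (row.length : Int))
   ∨ (∀ dd ∈ ([(1,0),(0,1),(-1,0),(0,-1)] : List (Int × Int)),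
        ¬(0 ≤ dd.2 + PySem.List.pyGetD source 1 0 ∧ dd.2 + PySem.List.pyGetD source 1 0 < num_col ∧
          0 ≤ dd.1 + PySem.List.pyGetD source 0 0 ∧ dd.1 + PySem.List.pyGetD source 0 0 < num_row)))
instance (source : List Int) (target : List Int) (graph : List (List String)) (teleports : List Int) (num_row : Int) (num_col : Int) : Decidable (Pre_bfs source target graph teleports num_row num_col) := by unfold Pre_bfs; infer_instance

def pvWitness_bfs : List Int × List Int × List (List String) × List Int × Int × Int :=
  ([0, 0], [1, 1], [[".", "."], [".", "X"]], [2], 2, 2)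

def Spec_bfs (source : List Int) (target : List Int) (graph : List (List String)) (teleports : List Int) (num_row : Int) (num_col : Int) (out : Option Int) : Prop := out = bfs_alt source target graph teleports num_row num_col
instance (source : List Int) (target : List Int) (graph : List (List String)) (teleports : List Int) (num_row : Int) (num_col : Int) (out : Option Int) : Decidable (Spec_bfs source target graph teleports num_row num_col out) := by unfold Spec_bfs; infer_instance

-- ===== CLAIM (what is proved, stated in full; the proofs are below) =====
def Claim_equal_bfs : Prop := ∀ (source : List Int) (target : List Int) (graph : List (List String)) (teleports : List Int) (num_row : Int) (num_col : Int), Dom_bfs source target graph teleports num_row num_col → Pre_bfs source target graph teleports num_row num_col → Spec_bfs source target graph teleports num_row num_col (bfs source target graph teleports num_row num_col)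

-- ===== LEMMAS AND PROOFS =====

-- proof-only helpers and lemmas (nothing below is used by the definitions above)

-- the four offsets, shared reference value
def pvDeltas : List (Int × Int) := [(1,0),(0,1),(-1,0),(0,-1)]

-- reference description of one pop's neighbour processing: walk the offsets, and for each
-- in-bounds non-'X' cell not yet visited, record it with distance d0 + 1
def pvRef (graph : List (List String)) (num_row num_col : Int) (pos : List Int) (d0 : Int) :
    List (Int × Int) → PySem.Set Int → PySem.Dict Int Int →
    (List (List Int) × PySem.Set Int × PySem.Dict Int Int)
  | [], vis, dist => ([], vis, dist)
  | dd :: ds, vis, dist =>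
    let nr := dd.1 + PySem.List.pyGetD pos 0 0
    let nc := dd.2 + PySem.List.pyGetD pos 1 0
    if 0 ≤ nc ∧ nc < num_col ∧ 0 ≤ nr ∧ nr < num_row ∧ (pvCellA graph nr nc == "X") = false then
      (let i := nc + nr * num_col
       if vis.contains i then pvRef graph num_row num_col pos d0 ds vis dist
       else
         let r := pvRef graph num_row num_col pos d0 ds (vis.add i) (dist.insert i (d0 + 1))
         ([nr, nc] :: r.1, r.2.1, r.2.2))
    else pvRef graph num_row num_col pos d0 ds vis dist

lemma pvIdxA_pair (r c num_col : Int) : pvIdxA [r, c] num_col = c + r * num_col := by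
  simp [pvIdxA, pysem]

lemma pvIdxB_eq_pvIdxA : @pvIdxB = @pvIdxA := rfl

-- neighbours(pos, …) as a filterMap over the offsets
def pvNb (pos : List Int) (graph : List (List String)) (n_row n_col : Int)
    (ds : List (Int × Int)) : List (List Int) :=
  ds.filterMap (fun p =>
    let nr := p.1 + PySem.List.pyGetD pos 0 0
    let nc := p.2 + PySem.List.pyGetD pos 1 0
    if 0 ≤ nc ∧ nc < n_col ∧ 0 ≤ nr ∧ nr < n_row ∧ (pvCellA graph nr nc == "X") = false then
      some [nr, nc] else none)

lemma pvNeighboursA_eq (pos : List Int) (graph : List (List String)) (n_row n_col : Int) :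
    pvNeighboursA pos graph n_row n_col = pvNb pos graph n_row n_col pvDeltas := by
  have h : ∀ (ds : List (Int × Int)) (acc : List (List Int)),
      ds.foldl (fun acc p =>
        let nr := p.1 + PySem.List.pyGetD pos 0 0
        let nc := p.2 + PySem.List.pyGetD pos 1 0
        if 0 ≤ nc ∧ nc < n_col ∧ 0 ≤ nr ∧ nr < n_row ∧ (pvCellA graph nr nc == "X") = false then
          acc ++ [[nr, nc]] else acc) acc
      = acc ++ pvNb pos graph n_row n_col ds := by
    intro ds
    induction ds with
    | nil => intro acc; simp [pvNb]
    | cons dd ds ih =>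
      intro acc
      simp only [List.foldl_cons, pvNb, List.filterMap_cons]
      by_cases hc : 0 ≤ dd.2 + PySem.List.pyGetD pos 1 0 ∧ dd.2 + PySem.List.pyGetD pos 1 0 < n_col ∧
          0 ≤ dd.1 + PySem.List.pyGetD pos 0 0 ∧ dd.1 + PySem.List.pyGetD pos 0 0 < n_row ∧
          (pvCellA graph (dd.1 + PySem.List.pyGetD pos 0 0) (dd.2 + PySem.List.pyGetD pos 1 0) == "X") = false
      · simp only [hc]
        rw [ih]
        simp [pvNb]
      · simp only [hc, if_neg, not_false_iff]
        rw [ih]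
        simp [pvNb]
  exact h _ _

-- key fact: a neighbour's 1D index is never the parent's 1D index (the offset shifts it by ±1 or ±num_col ≠ 0)
lemma pvHK (pos : List Int) (num_row num_col : Int) (graph : List (List String)) :
    ∀ dd ∈ pvDeltas,
      (0 ≤ dd.2 + PySem.List.pyGetD pos 1 0 ∧ dd.2 + PySem.List.pyGetD pos 1 0 < num_col ∧
       0 ≤ dd.1 + PySem.List.pyGetD pos 0 0 ∧ dd.1 + PySem.List.pyGetD pos 0 0 < num_row ∧
       (pvCellA graph (dd.1 + PySem.List.pyGetD pos 0 0) (dd.2 + PySem.List.pyGetD pos 1 0) == "X") = false) →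
      (dd.2 + PySem.List.pyGetD pos 1 0) + (dd.1 + PySem.List.pyGetD pos 0 0) * num_col ≠ pvIdxA pos num_col := by
  intro dd hdd hc
  have hC : 0 < num_col := by
    rcases hc with ⟨h1, h2, _⟩
    omega
  set p0 := PySem.List.pyGetD pos 0 0 with hp0
  set p1 := PySem.List.pyGetD pos 1 0 with hp1
  have hK : pvIdxA pos num_col = p1 + p0 * num_col := rfl
  rw [hK]
  simp only [pvDeltas, List.mem_cons, List.not_mem_nil, or_false] at hdd
  rcases hdd with h | h | h | h
  · subst h
    intro h
    have : (0 + p1) + (1 + p0) * num_col = (p1 + p0 * num_col) + num_col := by ring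
    rw [this] at h
    linarith
  · subst h
    intro h
    have : (1 + p1) + (0 + p0) * num_col = (p1 + p0 * num_col) + 1 := by ring
    rw [this] at h
    linarith
  · subst h
    intro h
    have : (0 + p1) + (-1 + p0) * num_col = (p1 + p0 * num_col) - num_col := by ring
    rw [this] at h
    linarith
  · subst h
    intro h
    have : (-1 + p1) + (0 + p0) * num_col = (p1 + p0 * num_col) - 1 := by ring
    rw [this] at h
    linarith

lemma pvCellB_eq : @pvCellB = @pvCellA := rfl

-- B's inner for-loop over the offsets equals pvRef
lemma pvFoldB (graph : List (List String)) (num_row num_col : Int) (pos : List Int) (d0 : Int) :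
    ∀ (ds : List (Int × Int)) (qB : List (List Int)) (vis : PySem.Set Int) (dist : PySem.Dict Int Int),
    ds.foldl
      (fun (st : List (List Int) × PySem.Set Int × PySem.Dict Int Int) dd =>
        if 0 ≤ dd.2 + PySem.List.pyGetD pos 1 0 ∧ dd.2 + PySem.List.pyGetD pos 1 0 < num_col ∧
            0 ≤ dd.1 + PySem.List.pyGetD pos 0 0 ∧ dd.1 + PySem.List.pyGetD pos 0 0 < num_row ∧
            (pvCellA graph (dd.1 + PySem.List.pyGetD pos 0 0) (dd.2 + PySem.List.pyGetD pos 1 0) == "X") = false then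
          (if st.2.1.contains ((dd.2 + PySem.List.pyGetD pos 1 0) + (dd.1 + PySem.List.pyGetD pos 0 0) * num_col) = true then st
           else (st.1 ++ [[dd.1 + PySem.List.pyGetD pos 0 0, dd.2 + PySem.List.pyGetD pos 1 0]],
                 st.2.1.add ((dd.2 + PySem.List.pyGetD pos 1 0) + (dd.1 + PySem.List.pyGetD pos 0 0) * num_col),
                 st.2.2.insert ((dd.2 + PySem.List.pyGetD pos 1 0) + (dd.1 + PySem.List.pyGetD pos 0 0) * num_col) (d0 + 1)))
        else st)
      (qB, vis, dist)
    = (qB ++ (pvRef graph num_row num_col pos d0 ds vis dist).1,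
       (pvRef graph num_row num_col pos d0 ds vis dist).2.1,
       (pvRef graph num_row num_col pos d0 ds vis dist).2.2) := by
  intro ds
  induction ds with
  | nil => intro qB vis dist; simp [pvRef]
  | cons dd ds ih =>
    intro qB vis dist
    simp only [List.foldl_cons, pvRef]
    by_cases hc : 0 ≤ dd.2 + PySem.List.pyGetD pos 1 0 ∧ dd.2 + PySem.List.pyGetD pos 1 0 < num_col ∧
        0 ≤ dd.1 + PySem.List.pyGetD pos 0 0 ∧ dd.1 + PySem.List.pyGetD pos 0 0 < num_row ∧
        (pvCellA graph (dd.1 + PySem.List.pyGetD pos 0 0) (dd.2 + PySem.List.pyGetD pos 1 0) == "X") = false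
    · simp only [if_pos hc]
      by_cases hv : vis.contains ((dd.2 + PySem.List.pyGetD pos 1 0) + (dd.1 + PySem.List.pyGetD pos 0 0) * num_col) = true
      · simp only [if_pos hv]
        exact ih qB vis dist
      · simp only [if_neg hv]
        rw [ih]
        simp
    · simp only [if_neg hc]
      exact ih qB vis dist

-- A's inner for-loop over neighbours(...) equals pvRef, provided the parent's dist entry is d0
-- and no written key is the parent's key (pvHK)
lemma pvFoldA (graph : List (List String)) (num_row num_col : Int) (pos : List Int) (d0 : Int) :
    ∀ (ds : List (Int × Int)) (qA : List (List Int)) (vis : PySem.Set Int) (dist : PySem.Dict Int Int),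
    dist.getD (pvIdxA pos num_col) 0 = d0 →
    (∀ dd ∈ ds,
      (0 ≤ dd.2 + PySem.List.pyGetD pos 1 0 ∧ dd.2 + PySem.List.pyGetD pos 1 0 < num_col ∧
       0 ≤ dd.1 + PySem.List.pyGetD pos 0 0 ∧ dd.1 + PySem.List.pyGetD pos 0 0 < num_row ∧
       (pvCellA graph (dd.1 + PySem.List.pyGetD pos 0 0) (dd.2 + PySem.List.pyGetD pos 1 0) == "X") = false) →
      (dd.2 + PySem.List.pyGetD pos 1 0) + (dd.1 + PySem.List.pyGetD pos 0 0) * num_col ≠ pvIdxA pos num_col) →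
    (pvNb pos graph num_row num_col ds).foldl
      (fun (st : List (List Int) × PySem.Set Int × PySem.Dict Int Int) nb =>
        if st.2.1.contains (pvIdxA nb num_col) = true then st
        else (st.1 ++ [nb], st.2.1.add (pvIdxA nb num_col),
              st.2.2.insert (pvIdxA nb num_col)
                (if st.2.2.contains (pvIdxA pos num_col) = true then st.2.2.getD (pvIdxA pos num_col) 0 + 1 else 1)))
      (qA, vis, dist)
    = (qA ++ (pvRef graph num_row num_col pos d0 ds vis dist).1,
       (pvRef graph num_row num_col pos d0 ds vis dist).2.1,
       (pvRef graph num_row num_col pos d0 ds vis dist).2.2) := by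
  intro ds
  induction ds with
  | nil => intro qA vis dist _ _; simp [pvNb, pvRef]
  | cons dd ds ih =>
    intro qA vis dist hd0 hK
    by_cases hc : 0 ≤ dd.2 + PySem.List.pyGetD pos 1 0 ∧ dd.2 + PySem.List.pyGetD pos 1 0 < num_col ∧
        0 ≤ dd.1 + PySem.List.pyGetD pos 0 0 ∧ dd.1 + PySem.List.pyGetD pos 0 0 < num_row ∧
        (pvCellA graph (dd.1 + PySem.List.pyGetD pos 0 0) (dd.2 + PySem.List.pyGetD pos 1 0) == "X") = false
    · have hnb : pvNb pos graph num_row num_col (dd :: ds)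
          = [dd.1 + PySem.List.pyGetD pos 0 0, dd.2 + PySem.List.pyGetD pos 1 0] :: pvNb pos graph num_row num_col ds := by
        simp only [pvNb, List.filterMap_cons, if_pos hc]
      rw [hnb, List.foldl_cons]
      have hidx : pvIdxA [dd.1 + PySem.List.pyGetD pos 0 0, dd.2 + PySem.List.pyGetD pos 1 0] num_col
          = (dd.2 + PySem.List.pyGetD pos 1 0) + (dd.1 + PySem.List.pyGetD pos 0 0) * num_col :=
        pvIdxA_pair _ _ _
      simp only [pvRef, if_pos hc, hidx]
      by_cases hv : vis.contains ((dd.2 + PySem.List.pyGetD pos 1 0) + (dd.1 + PySem.List.pyGetD pos 0 0) * num_col) = true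
      · simp only [if_pos hv]
        exact ih qA vis dist hd0 (fun x hx => hK x (List.mem_cons_of_mem _ hx))
      · simp only [if_neg hv]
        have hne : (dd.2 + PySem.List.pyGetD pos 1 0) + (dd.1 + PySem.List.pyGetD pos 0 0) * num_col ≠ pvIdxA pos num_col :=
          hK dd List.mem_cons_self hc
        have hval : (if dist.contains (pvIdxA pos num_col) = true then dist.getD (pvIdxA pos num_col) 0 + 1 else 1) = d0 + 1 := by
          by_cases hcon : dist.contains (pvIdxA pos num_col) = true
          · rw [if_pos hcon, hd0]
          · rw [if_neg hcon]
            have h0 : dist.getD (pvIdxA pos num_col) 0 = 0 :=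
              PySem.Dict.getD_of_not_contains _ _ (eq_false_of_ne_true hcon)
            omega
        rw [hval]
        have hd0' : (dist.insert ((dd.2 + PySem.List.pyGetD pos 1 0) + (dd.1 + PySem.List.pyGetD pos 0 0) * num_col) (d0 + 1)).getD (pvIdxA pos num_col) 0 = d0 := by
          rw [PySem.Dict.getD_insert_of_ne _ _ _ (Ne.symm hne)]
          exact hd0
        rw [ih _ _ _ hd0' (fun x hx => hK x (List.mem_cons_of_mem _ hx))]
        simp
    · have hnb : pvNb pos graph num_row num_col (dd :: ds) = pvNb pos graph num_row num_col ds := by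
        simp only [pvNb, List.filterMap_cons, if_neg hc]
      rw [hnb]
      have hrf : pvRef graph num_row num_col pos d0 (dd :: ds) vis dist
          = pvRef graph num_row num_col pos d0 ds vis dist := by
        simp only [pvRef, if_neg hc]
      rw [hrf]
      exact ih qA vis dist hd0 (fun x hx => hK x (List.mem_cons_of_mem _ hx))

-- preservation facts for one pop's neighbour processing
lemma pvRef_pres (graph : List (List String)) (num_row num_col : Int) (pos : List Int) (d0 : Int) :
    ∀ (ds : List (Int × Int)) (vis : PySem.Set Int) (dist : PySem.Dict Int Int),
    (∀ j, dist.contains j = true → vis.contains j = true) →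
    ( (∀ k v, dist.get? k = some v →
        (pvRef graph num_row num_col pos d0 ds vis dist).2.2.get? k = some v)
    ∧ (∀ j, (pvRef graph num_row num_col pos d0 ds vis dist).2.2.contains j = true →
        (pvRef graph num_row num_col pos d0 ds vis dist).2.1.contains j = true)
    ∧ (∀ p ∈ (pvRef graph num_row num_col pos d0 ds vis dist).1,
        (pvRef graph num_row num_col pos d0 ds vis dist).2.2.contains (pvIdxA p num_col) = true)
    ∧ (0 ≤ d0 → (∀ j, 0 ≤ dist.getD j 0) →
        ∀ j, 0 ≤ (pvRef graph num_row num_col pos d0 ds vis dist).2.2.getD j 0) ) := by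
  intro ds
  induction ds with
  | nil =>
    intro vis dist hkv
    refine ⟨fun k v h => h, fun j h => hkv j h, by simp [pvRef], fun _ hv j => hv j⟩
  | cons dd ds ih =>
    intro vis dist hkv
    by_cases hc : 0 ≤ dd.2 + PySem.List.pyGetD pos 1 0 ∧ dd.2 + PySem.List.pyGetD pos 1 0 < num_col ∧
        0 ≤ dd.1 + PySem.List.pyGetD pos 0 0 ∧ dd.1 + PySem.List.pyGetD pos 0 0 < num_row ∧
        (pvCellA graph (dd.1 + PySem.List.pyGetD pos 0 0) (dd.2 + PySem.List.pyGetD pos 1 0) == "X") = false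
    · by_cases hv : vis.contains ((dd.2 + PySem.List.pyGetD pos 1 0) + (dd.1 + PySem.List.pyGetD pos 0 0) * num_col) = true
      · have hrw : pvRef graph num_row num_col pos d0 (dd :: ds) vis dist
            = pvRef graph num_row num_col pos d0 ds vis dist := by
          simp only [pvRef, if_pos hc, if_pos hv]
        rw [hrw]
        exact ih vis dist hkv
      · have hrw : pvRef graph num_row num_col pos d0 (dd :: ds) vis dist
            = ([dd.1 + PySem.List.pyGetD pos 0 0, dd.2 + PySem.List.pyGetD pos 1 0] ::
                (pvRef graph num_row num_col pos d0 ds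
                  (vis.add ((dd.2 + PySem.List.pyGetD pos 1 0) + (dd.1 + PySem.List.pyGetD pos 0 0) * num_col))
                  (dist.insert ((dd.2 + PySem.List.pyGetD pos 1 0) + (dd.1 + PySem.List.pyGetD pos 0 0) * num_col) (d0 + 1))).1,
               (pvRef graph num_row num_col pos d0 ds
                  (vis.add ((dd.2 + PySem.List.pyGetD pos 1 0) + (dd.1 + PySem.List.pyGetD pos 0 0) * num_col))
                  (dist.insert ((dd.2 + PySem.List.pyGetD pos 1 0) + (dd.1 + PySem.List.pyGetD pos 0 0) * num_col) (d0 + 1))).2.1,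
               (pvRef graph num_row num_col pos d0 ds
                  (vis.add ((dd.2 + PySem.List.pyGetD pos 1 0) + (dd.1 + PySem.List.pyGetD pos 0 0) * num_col))
                  (dist.insert ((dd.2 + PySem.List.pyGetD pos 1 0) + (dd.1 + PySem.List.pyGetD pos 0 0) * num_col) (d0 + 1))).2.2) := by
          simp only [pvRef, if_pos hc, if_neg hv]
        set i := (dd.2 + PySem.List.pyGetD pos 1 0) + (dd.1 + PySem.List.pyGetD pos 0 0) * num_col with hi
        have hkv' : ∀ j, (dist.insert i (d0 + 1)).contains j = true → (vis.add i).contains j = true := by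
          intro j hj
          rw [PySem.Dict.contains_insert] at hj
          rcases Bool.or_eq_true_iff.mp hj with h | h
          · have : j = i := by simpa using h
            subst this
            simp [PySem.Set.mem_add]
          · have := hkv j h
            simp only [PySem.Set.contains_iff, PySem.Set.mem_add] at *
            exact Or.inl this
        have IH := ih (vis.add i) (dist.insert i (d0 + 1)) hkv'
        rw [hrw]
        refine ⟨?_, ?_, ?_, ?_⟩
        · intro k v h
          have hik : dist.contains i = false := by
            by_contra hcon
            have : dist.contains i = true := by
              cases hcc : dist.contains i
              · exact absurd hcc hcon
              · rfl
            exact hv (hkv i this)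
          have hkne : k ≠ i := by
            intro he
            subst he
            rw [PySem.Dict.contains_eq_isSome_get?, h] at hik
            simp at hik
          exact IH.1 k v (by rw [PySem.Dict.get?_insert_of_ne _ _ hkne]; exact h)
        · exact IH.2.1
        · intro p hp
          rcases List.mem_cons.mp hp with h | h
          · subst h
            rw [pvIdxA_pair, ← hi]
            have := IH.1 i (d0 + 1) (PySem.Dict.get?_insert_self _ _ _)
            rw [PySem.Dict.contains_eq_isSome_get?, this]
            rfl
          · exact IH.2.2.1 p h
        · intro hd0 hval j
          refine IH.2.2.2 hd0 ?_ j
          intro j'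
          rw [PySem.Dict.getD_insert]
          split_ifs with hji
          · omega
          · exact hval j'
    · have hrw : pvRef graph num_row num_col pos d0 (dd :: ds) vis dist
          = pvRef graph num_row num_col pos d0 ds vis dist := by
        simp only [pvRef, if_neg hc]
      rw [hrw]
      exact ih vis dist hkv

-- bindings already present in dist survive the whole of B's phase-1 loop
lemma pvLoopB_pres (graph : List (List String)) (num_row num_col : Int) :
    ∀ (f : Nat) (q : List (List Int)) (head : Nat) (vis : PySem.Set Int) (dist : PySem.Dict Int Int),
    (∀ j, dist.contains j = true → vis.contains j = true) →
    (∀ k v, dist.get? k = some v →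
      (pvLoopB graph num_row num_col f q head vis dist).2.get? k = some v) := by
  intro f
  induction f with
  | zero => intro q head vis dist _ k v h; simpa [pvLoopB] using h
  | succ f ih =>
    intro q head vis dist hkv k v h
    cases hq : q[head]? with
    | none => simpa [pvLoopB, hq] using h
    | some pos =>
      have hB := pvFoldB graph num_row num_col pos (dist.getD (pvIdxA pos num_col) 0) pvDeltasB q vis dist
      simp only [pvLoopB, hq, pvCellB_eq, pvIdxB_eq_pvIdxA]
      rw [hB]
      have hpres := pvRef_pres graph num_row num_col pos (dist.getD (pvIdxA pos num_col) 0) pvDeltasB vis dist hkv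
      exact ih _ _ _ _ hpres.2.1 k v (hpres.1 k v h)

lemma pvDeltasB_eq : pvDeltasB = pvDeltas := rfl

-- once a teleport has been seen (mtd = m ≠ -1), A's loop returns dist[target] - m at the first pop
-- of target and None if the queue runs dry; that is exactly a lookup in B's completed trace
lemma pvL2 (source target : List Int) (graph : List (List String)) (teleports : List Int) (num_row num_col : Int) :
    ∀ (f : Nat) (q qB : List (List Int)) (head : Nat) (vis : PySem.Set Int) (dist : PySem.Dict Int Int) (m : Int),
    (m == -1) = false →
    qB.drop head = q →
    (∀ p ∈ q, dist.contains (pvIdxA p num_col) = true) →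
    (∀ j, dist.contains j = true → vis.contains j = true) →
    pvLoopA source target graph teleports num_row num_col f q vis dist m
      = (match PySem.List.index? (pvLoopB graph num_row num_col f qB head vis dist).1 target with
         | none => none
         | some _ => some ((pvLoopB graph num_row num_col f qB head vis dist).2.getD (pvIdxA target num_col) 0 - m)) := by
  intro f
  induction f with
  | zero =>
    intro q qB head vis dist m hm hrel hq hkv
    simp [pvLoopA, pvLoopB, PySem.List.index?_eq_idxOf?]
  | succ f ih =>
    intro q qB head vis dist m hm hrel hq hkv
    cases q with
    | nil =>
      have hlen : qB.length ≤ head := List.drop_eq_nil_iff.mp hrel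
      have hnone : qB[head]? = none := List.getElem?_eq_none hlen
      simp [pvLoopA, pvLoopB, hnone, PySem.List.index?_eq_idxOf?]
    | cons pos rest =>
      have hgq : qB[head]? = some pos := by
        rw [← List.head?_drop, hrel]; rfl
      have hlen : head < qB.length := by
        have := List.getElem?_eq_some_iff.mp hgq
        exact this.1
      have hpres := pvRef_pres graph num_row num_col pos (dist.getD (pvIdxA pos num_col) 0) pvDeltas vis dist hkv
      have hcontp : ∀ j, dist.contains j = true →
          (pvRef graph num_row num_col pos (dist.getD (pvIdxA pos num_col) 0) pvDeltas vis dist).2.2.contains j = true := by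
        intro j hj
        rw [PySem.Dict.contains_eq_isSome_get?] at hj
        obtain ⟨v, hv⟩ := Option.isSome_iff_exists.mp hj
        have := hpres.1 j v hv
        rw [PySem.Dict.contains_eq_isSome_get?, this]
        rfl
      by_cases hpt : (pos == target) = true
      · have hpt' : pos = target := by simpa using hpt
        have hmne : ¬ ((m == -1) = true) := by simp [hm]
        have hA : pvLoopA source target graph teleports num_row num_col (f+1) (pos :: rest) vis dist m
            = some (dist.getD (pvIdxA pos num_col) 0 - m) := by
          simp only [pvLoopA, if_pos hpt, if_neg hmne]
        rw [hA]
        have hB := pvFoldB graph num_row num_col pos (dist.getD (pvIdxA pos num_col) 0) pvDeltasB qB vis dist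
        simp only [pvLoopB, hgq, pvCellB_eq, pvIdxB_eq_pvIdxA]
        rw [hB]
        -- target's dist entry survives to the end of B's loop
        have hc := hq pos (List.mem_cons_self)
        rw [PySem.Dict.contains_eq_isSome_get?] at hc
        obtain ⟨v, hv⟩ := Option.isSome_iff_exists.mp hc
        rw [pvDeltasB_eq]
        have hv1 := hpres.1 _ v hv
        have hv2 := pvLoopB_pres graph num_row num_col f
          (qB ++ (pvRef graph num_row num_col pos (dist.getD (pvIdxA pos num_col) 0) pvDeltas vis dist).1)
          (head+1)
          (pvRef graph num_row num_col pos (dist.getD (pvIdxA pos num_col) 0) pvDeltas vis dist).2.1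
          (pvRef graph num_row num_col pos (dist.getD (pvIdxA pos num_col) 0) pvDeltas vis dist).2.2
          hpres.2.1 _ v hv1
        rw [hpt'] at hv
        have hfin : (pvLoopB graph num_row num_col f
            (qB ++ (pvRef graph num_row num_col pos (dist.getD (pvIdxA pos num_col) 0) pvDeltas vis dist).1) (head+1)
            (pvRef graph num_row num_col pos (dist.getD (pvIdxA pos num_col) 0) pvDeltas vis dist).2.1
            (pvRef graph num_row num_col pos (dist.getD (pvIdxA pos num_col) 0) pvDeltas vis dist).2.2).2.getD (pvIdxA target num_col) 0 = v := by
          apply PySem.Dict.getD_of_get?_eq_some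
          rw [← hpt']
          exact hv2
        have hix : PySem.List.index? (pos :: (pvLoopB graph num_row num_col f
            (qB ++ (pvRef graph num_row num_col pos (dist.getD (pvIdxA pos num_col) 0) pvDeltas vis dist).1) (head+1)
            (pvRef graph num_row num_col pos (dist.getD (pvIdxA pos num_col) 0) pvDeltas vis dist).2.1
            (pvRef graph num_row num_col pos (dist.getD (pvIdxA pos num_col) 0) pvDeltas vis dist).2.2).1) target = some 0 := by
          rw [hpt']
          exact PySem.List.index?_cons_self _ _
        rw [hix, hfin]
        rw [hpt']
        have : dist.getD (pvIdxA target num_col) 0 = v := PySem.Dict.getD_of_get?_eq_some _ _ hv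
        rw [this]
      · have hne : pos ≠ target := by
          intro h
          exact hpt (by simp [h])
        have hmtd : (if teleports.contains (pvIdxA pos num_col) && (m == -1) then
            (if dist.contains (pvIdxA pos num_col) then dist.getD (pvIdxA pos num_col) 0 else 0) else m) = m := by
          rw [hm, Bool.and_false]
          simp
        have hA := pvFoldA graph num_row num_col pos (dist.getD (pvIdxA pos num_col) 0) pvDeltas rest vis dist rfl
          (pvHK pos num_row num_col graph)
        have hB := pvFoldB graph num_row num_col pos (dist.getD (pvIdxA pos num_col) 0) pvDeltas qB vis dist
        simp only [pvLoopA, pvLoopB, if_neg hpt, hgq, pvCellB_eq, pvIdxB_eq_pvIdxA, hmtd, pvDeltasB_eq]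
        rw [pvNeighboursA_eq, hA, hB]
        have hrel' : (qB ++ (pvRef graph num_row num_col pos (dist.getD (pvIdxA pos num_col) 0) pvDeltas vis dist).1).drop (head+1)
            = rest ++ (pvRef graph num_row num_col pos (dist.getD (pvIdxA pos num_col) 0) pvDeltas vis dist).1 := by
          rw [List.drop_append_of_le_length hlen]
          congr 1
          have h1 : qB.drop (head+1) = (qB.drop head).drop 1 := by
            rw [List.drop_drop]
          rw [h1, hrel]
          rfl
        have hq' : ∀ p ∈ rest ++ (pvRef graph num_row num_col pos (dist.getD (pvIdxA pos num_col) 0) pvDeltas vis dist).1,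
            (pvRef graph num_row num_col pos (dist.getD (pvIdxA pos num_col) 0) pvDeltas vis dist).2.2.contains (pvIdxA p num_col) = true := by
          intro p hp
          rcases List.mem_append.mp hp with h | h
          · exact hcontp _ (hq p (List.mem_cons_of_mem _ h))
          · exact hpres.2.2.1 p h
        rw [ih (rest ++ (pvRef graph num_row num_col pos (dist.getD (pvIdxA pos num_col) 0) pvDeltas vis dist).1)
          (qB ++ (pvRef graph num_row num_col pos (dist.getD (pvIdxA pos num_col) 0) pvDeltas vis dist).1)
          (head+1)
          (pvRef graph num_row num_col pos (dist.getD (pvIdxA pos num_col) 0) pvDeltas vis dist).2.1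
          (pvRef graph num_row num_col pos (dist.getD (pvIdxA pos num_col) 0) pvDeltas vis dist).2.2
          m hm hrel' hq' hpres.2.1]
        cases hix : PySem.List.index? (pvLoopB graph num_row num_col f
            (qB ++ (pvRef graph num_row num_col pos (dist.getD (pvIdxA pos num_col) 0) pvDeltas vis dist).1) (head+1)
            (pvRef graph num_row num_col pos (dist.getD (pvIdxA pos num_col) 0) pvDeltas vis dist).2.1
            (pvRef graph num_row num_col pos (dist.getD (pvIdxA pos num_col) 0) pvDeltas vis dist).2.2).1 target with
        | none =>
          rw [PySem.List.index?_cons_of_ne _ hne, hix]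
          rfl
        | some k =>
          rw [PySem.List.index?_cons_of_ne _ hne, hix]
          rfl

-- one controlled unfolding step of B's loop
lemma pvLoopB_cons (graph : List (List String)) (num_row num_col : Int) (f : Nat)
    (q : List (List Int)) (head : Nat) (vis : PySem.Set Int) (dist : PySem.Dict Int Int)
    (pos : List Int) (h : q[head]? = some pos) :
    pvLoopB graph num_row num_col (f+1) q head vis dist
      = ((pos : List Int) :: (pvLoopB graph num_row num_col f
          (q ++ (pvRef graph num_row num_col pos (dist.getD (pvIdxA pos num_col) 0) pvDeltas vis dist).1) (head+1)
          (pvRef graph num_row num_col pos (dist.getD (pvIdxA pos num_col) 0) pvDeltas vis dist).2.1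
          (pvRef graph num_row num_col pos (dist.getD (pvIdxA pos num_col) 0) pvDeltas vis dist).2.2).1,
         (pvLoopB graph num_row num_col f
          (q ++ (pvRef graph num_row num_col pos (dist.getD (pvIdxA pos num_col) 0) pvDeltas vis dist).1) (head+1)
          (pvRef graph num_row num_col pos (dist.getD (pvIdxA pos num_col) 0) pvDeltas vis dist).2.1
          (pvRef graph num_row num_col pos (dist.getD (pvIdxA pos num_col) 0) pvDeltas vis dist).2.2).2) := by
  conv_lhs => rw [pvLoopB]
  simp only [h, pvCellB_eq, pvIdxB_eq_pvIdxA, pvDeltasB_eq]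
  rw [pvFoldB graph num_row num_col pos (dist.getD (pvIdxA pos num_col) 0) pvDeltas q vis dist]

-- Source B's phase 2 as a function of (pop order, dist)
def pvPost (source target : List Int) (teleports : List Int) (num_col : Int)
    (r : List (List Int) × PySem.Dict Int Int) : Option Int :=
  match PySem.List.index? r.1 target with
  | none => none
  | some k =>
    match (r.1.take k).find? (fun p => teleports.contains (pvIdxA p num_col)) with
    | none => some 0
    | some p => some (r.2.getD (pvIdxA target num_col) 0 -
        (if p == source then 0 else r.2.getD (pvIdxA p num_col) 0))

-- while no teleport has been seen (mtd = -1) and the source's own index is not a teleport,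
-- A's remaining loop computes exactly B's post-scan of the remaining trace
lemma pvL1 (source target : List Int) (graph : List (List String)) (teleports : List Int) (num_row num_col : Int) :
    ∀ (f : Nat) (q qB : List (List Int)) (head : Nat) (vis : PySem.Set Int) (dist : PySem.Dict Int Int),
    teleports.contains (pvIdxA source num_col) = false →
    qB.drop head = q →
    (∀ p ∈ q, dist.contains (pvIdxA p num_col) = true) →
    (∀ j, dist.contains j = true → vis.contains j = true) →
    (∀ j, 0 ≤ dist.getD j 0) →
    pvLoopA source target graph teleports num_row num_col f q vis dist (-1)
      = pvPost source target teleports num_col (pvLoopB graph num_row num_col f qB head vis dist) := by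
  intro f
  induction f with
  | zero =>
    intro q qB head vis dist hsrc hrel hq hkv hval
    simp [pvLoopA, pvLoopB, pvPost, PySem.List.index?_eq_idxOf?]
  | succ f ih =>
    intro q qB head vis dist hsrc hrel hq hkv hval
    cases q with
    | nil =>
      have hlen : qB.length ≤ head := List.drop_eq_nil_iff.mp hrel
      have hnone : qB[head]? = none := List.getElem?_eq_none hlen
      simp [pvLoopA, pvLoopB, hnone, pvPost, PySem.List.index?_eq_idxOf?]
    | cons pos rest =>
      have hgq : qB[head]? = some pos := by
        rw [← List.head?_drop, hrel]; rfl
      have hlen : head < qB.length := (List.getElem?_eq_some_iff.mp hgq).1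
      have hpres := pvRef_pres graph num_row num_col pos (dist.getD (pvIdxA pos num_col) 0) pvDeltas vis dist hkv
      have hcontp : ∀ j, dist.contains j = true →
          (pvRef graph num_row num_col pos (dist.getD (pvIdxA pos num_col) 0) pvDeltas vis dist).2.2.contains j = true := by
        intro j hj
        rw [PySem.Dict.contains_eq_isSome_get?] at hj
        obtain ⟨v, hv⟩ := Option.isSome_iff_exists.mp hj
        have := hpres.1 j v hv
        rw [PySem.Dict.contains_eq_isSome_get?, this]
        rfl
      have hB := pvFoldB graph num_row num_col pos (dist.getD (pvIdxA pos num_col) 0) pvDeltas qB vis dist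
      by_cases hpt : (pos == target) = true
      · have hpt' : pos = target := by simpa using hpt
        have hA : pvLoopA source target graph teleports num_row num_col (f+1) (pos :: rest) vis dist (-1)
            = some 0 := by
          simp only [pvLoopA, if_pos hpt, if_pos (show (((-1 : Int) == -1) = true) by decide)]
        rw [hA]
        simp only [pvLoopB, hgq, pvCellB_eq, pvIdxB_eq_pvIdxA, pvDeltasB_eq]
        rw [hB]
        have hix : PySem.List.index? (pos :: (pvLoopB graph num_row num_col f
            (qB ++ (pvRef graph num_row num_col pos (dist.getD (pvIdxA pos num_col) 0) pvDeltas vis dist).1) (head+1)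
            (pvRef graph num_row num_col pos (dist.getD (pvIdxA pos num_col) 0) pvDeltas vis dist).2.1
            (pvRef graph num_row num_col pos (dist.getD (pvIdxA pos num_col) 0) pvDeltas vis dist).2.2).1) target = some 0 := by
          rw [hpt']
          exact PySem.List.index?_cons_self _ _
        simp only [pvPost, hix, List.take_zero, List.find?_nil]
      · have hne : pos ≠ target := fun h => hpt (by simp [h])
        have hrel' : (qB ++ (pvRef graph num_row num_col pos (dist.getD (pvIdxA pos num_col) 0) pvDeltas vis dist).1).drop (head+1)
            = rest ++ (pvRef graph num_row num_col pos (dist.getD (pvIdxA pos num_col) 0) pvDeltas vis dist).1 := by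
          rw [List.drop_append_of_le_length hlen]
          congr 1
          rw [show qB.drop (head+1) = (qB.drop head).drop 1 from by rw [List.drop_drop], hrel]
          rfl
        have hq' : ∀ p ∈ rest ++ (pvRef graph num_row num_col pos (dist.getD (pvIdxA pos num_col) 0) pvDeltas vis dist).1,
            (pvRef graph num_row num_col pos (dist.getD (pvIdxA pos num_col) 0) pvDeltas vis dist).2.2.contains (pvIdxA p num_col) = true := by
          intro p hp
          rcases List.mem_append.mp hp with h | h
          · exact hcontp _ (hq p (List.mem_cons_of_mem _ h))
          · exact hpres.2.2.1 p h
        have hval' : ∀ j, 0 ≤ (pvRef graph num_row num_col pos (dist.getD (pvIdxA pos num_col) 0) pvDeltas vis dist).2.2.getD j 0 :=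
          hpres.2.2.2 (hval _) hval
        have hA := pvFoldA graph num_row num_col pos (dist.getD (pvIdxA pos num_col) 0) pvDeltas rest vis dist rfl
          (pvHK pos num_row num_col graph)
        by_cases htel : teleports.contains (pvIdxA pos num_col) = true
        · -- first teleport found here: switch to the settled-mtd lemma with m = dist[idx pos]
          have hcK := hq pos (List.mem_cons_self)
          have hmtd : (if teleports.contains (pvIdxA pos num_col) && ((-1 : Int) == -1) then
              (if dist.contains (pvIdxA pos num_col) then dist.getD (pvIdxA pos num_col) 0 else 0) else (-1 : Int))
              = dist.getD (pvIdxA pos num_col) 0 := by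
            rw [htel]
            simp [hcK]
          have hm : ((dist.getD (pvIdxA pos num_col) 0) == -1) = false := by
            have h0 := hval (pvIdxA pos num_col)
            have : dist.getD (pvIdxA pos num_col) 0 ≠ -1 := by omega
            exact beq_eq_false_iff_ne.mpr this
          simp only [pvLoopA, pvLoopB, if_neg hpt, hgq, pvCellB_eq, pvIdxB_eq_pvIdxA, pvDeltasB_eq, hmtd]
          rw [pvNeighboursA_eq, hA, hB]
          rw [pvL2 source target graph teleports num_row num_col f
            (rest ++ (pvRef graph num_row num_col pos (dist.getD (pvIdxA pos num_col) 0) pvDeltas vis dist).1)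
            (qB ++ (pvRef graph num_row num_col pos (dist.getD (pvIdxA pos num_col) 0) pvDeltas vis dist).1)
            (head+1)
            (pvRef graph num_row num_col pos (dist.getD (pvIdxA pos num_col) 0) pvDeltas vis dist).2.1
            (pvRef graph num_row num_col pos (dist.getD (pvIdxA pos num_col) 0) pvDeltas vis dist).2.2
            (dist.getD (pvIdxA pos num_col) 0) hm hrel' hq' hpres.2.1]
          -- dist[idx pos] survives to the final dict
          rw [PySem.Dict.contains_eq_isSome_get?] at hcK
          obtain ⟨v, hv⟩ := Option.isSome_iff_exists.mp hcK
          have hv1 := hpres.1 _ v hv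
          have hv2 := pvLoopB_pres graph num_row num_col f
            (qB ++ (pvRef graph num_row num_col pos (dist.getD (pvIdxA pos num_col) 0) pvDeltas vis dist).1)
            (head+1)
            (pvRef graph num_row num_col pos (dist.getD (pvIdxA pos num_col) 0) pvDeltas vis dist).2.1
            (pvRef graph num_row num_col pos (dist.getD (pvIdxA pos num_col) 0) pvDeltas vis dist).2.2
            hpres.2.1 _ v hv1
          have hdv : dist.getD (pvIdxA pos num_col) 0 = v := PySem.Dict.getD_of_get?_eq_some _ _ hv
          have hps : (pos == source) = false := by
            refine beq_eq_false_iff_ne.mpr ?_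
            intro h
            rw [h] at htel
            rw [htel] at hsrc
            cases hsrc
          cases hix : PySem.List.index? (pvLoopB graph num_row num_col f
              (qB ++ (pvRef graph num_row num_col pos (dist.getD (pvIdxA pos num_col) 0) pvDeltas vis dist).1) (head+1)
              (pvRef graph num_row num_col pos (dist.getD (pvIdxA pos num_col) 0) pvDeltas vis dist).2.1
              (pvRef graph num_row num_col pos (dist.getD (pvIdxA pos num_col) 0) pvDeltas vis dist).2.2).1 target with
          | none =>
            simp only [pvPost, PySem.List.index?_cons_of_ne _ hne, hix]
            rfl
          | some k =>
            simp only [pvPost, PySem.List.index?_cons_of_ne _ hne, hix, Option.map_some]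
            rw [List.take_succ_cons]
            rw [List.find?_cons_of_pos (by simpa using htel)]
            have hfin : (pvLoopB graph num_row num_col f
                (qB ++ (pvRef graph num_row num_col pos (dist.getD (pvIdxA pos num_col) 0) pvDeltas vis dist).1) (head+1)
                (pvRef graph num_row num_col pos (dist.getD (pvIdxA pos num_col) 0) pvDeltas vis dist).2.1
                (pvRef graph num_row num_col pos (dist.getD (pvIdxA pos num_col) 0) pvDeltas vis dist).2.2).2.getD (pvIdxA pos num_col) 0 = v :=
              PySem.Dict.getD_of_get?_eq_some _ _ hv2
            simp only [hps]
            rw [hfin.trans hdv.symm]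
            simp
        · -- not a teleport: mtd stays -1
          have hmtd : (if teleports.contains (pvIdxA pos num_col) && ((-1 : Int) == -1) then
              (if dist.contains (pvIdxA pos num_col) then dist.getD (pvIdxA pos num_col) 0 else 0) else (-1 : Int))
              = (-1 : Int) := by
            rw [eq_false_of_ne_true htel]
            simp
          simp only [pvLoopA, pvLoopB, if_neg hpt, hgq, pvCellB_eq, pvIdxB_eq_pvIdxA, pvDeltasB_eq, hmtd]
          rw [pvNeighboursA_eq, hA, hB]
          rw [ih (rest ++ (pvRef graph num_row num_col pos (dist.getD (pvIdxA pos num_col) 0) pvDeltas vis dist).1)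
            (qB ++ (pvRef graph num_row num_col pos (dist.getD (pvIdxA pos num_col) 0) pvDeltas vis dist).1)
            (head+1)
            (pvRef graph num_row num_col pos (dist.getD (pvIdxA pos num_col) 0) pvDeltas vis dist).2.1
            (pvRef graph num_row num_col pos (dist.getD (pvIdxA pos num_col) 0) pvDeltas vis dist).2.2
            hsrc hrel' hq' hpres.2.1 hval']
          cases hix : PySem.List.index? (pvLoopB graph num_row num_col f
              (qB ++ (pvRef graph num_row num_col pos (dist.getD (pvIdxA pos num_col) 0) pvDeltas vis dist).1) (head+1)
              (pvRef graph num_row num_col pos (dist.getD (pvIdxA pos num_col) 0) pvDeltas vis dist).2.1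
              (pvRef graph num_row num_col pos (dist.getD (pvIdxA pos num_col) 0) pvDeltas vis dist).2.2).1 target with
          | none =>
            simp only [pvPost, PySem.List.index?_cons_of_ne _ hne, hix]
            rfl
          | some k =>
            simp only [pvPost, PySem.List.index?_cons_of_ne _ hne, hix, Option.map_some]
            rw [List.take_succ_cons]
            rw [List.find?_cons_of_neg (by simpa using htel)]

-- ===== VERDICT (by name: the statement is the Claim_ definition above) =====
theorem bfs_spec : Claim_equal_bfs := by
  unfold Claim_equal_bfs
  intro source target graph teleports num_row num_col _ _
  unfold Spec_bfs bfs bfs_alt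
  have hfe : num_row.toNat * num_col.toNat + 2 = (num_row.toNat * num_col.toNat + 1) + 1 := rfl
  rw [hfe]
  have hgq : ([source] : List (List Int))[0]? = some source := rfl
  have hB := pvFoldB graph num_row num_col source ((PySem.Dict.empty : PySem.Dict Int Int).getD (pvIdxA source num_col) 0)
    pvDeltas [source] PySem.Set.empty PySem.Dict.empty
  have hkv0 : ∀ j, (PySem.Dict.empty : PySem.Dict Int Int).contains j = true → (PySem.Set.empty : PySem.Set Int).contains j = true := by
    intro j hj
    simp [PySem.Dict.contains_empty] at hj
  have hpres := pvRef_pres graph num_row num_col source ((PySem.Dict.empty : PySem.Dict Int Int).getD (pvIdxA source num_col) 0)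
    pvDeltas PySem.Set.empty PySem.Dict.empty hkv0
  by_cases hst : (source == target) = true
  · have hst' : source = target := by simpa using hst
    simp only [pvLoopA, if_pos hst, if_pos (show (((-1 : Int) == -1) = true) by decide)]
    rw [pvLoopB_cons graph num_row num_col (num_row.toNat * num_col.toNat + 1) [source] 0 PySem.Set.empty PySem.Dict.empty source hgq]
    have hix : PySem.List.index? (source :: (pvLoopB graph num_row num_col (num_row.toNat * num_col.toNat + 1)
        ([source] ++ (pvRef graph num_row num_col source ((PySem.Dict.empty : PySem.Dict Int Int).getD (pvIdxA source num_col) 0) pvDeltas PySem.Set.empty PySem.Dict.empty).1) (0+1)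
        (pvRef graph num_row num_col source ((PySem.Dict.empty : PySem.Dict Int Int).getD (pvIdxA source num_col) 0) pvDeltas PySem.Set.empty PySem.Dict.empty).2.1
        (pvRef graph num_row num_col source ((PySem.Dict.empty : PySem.Dict Int Int).getD (pvIdxA source num_col) 0) pvDeltas PySem.Set.empty PySem.Dict.empty).2.2).1) target = some 0 := by
      rw [hst']
      exact PySem.List.index?_cons_self _ _
    simp only [hix, List.take_zero, List.find?_nil]
  · have hne : source ≠ target := fun h => hst (by simp [h])
    have hrel1 : (([source] : List (List Int)) ++ (pvRef graph num_row num_col source ((PySem.Dict.empty : PySem.Dict Int Int).getD (pvIdxA source num_col) 0) pvDeltas PySem.Set.empty PySem.Dict.empty).1).drop (0+1)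
        = ([] : List (List Int)) ++ (pvRef graph num_row num_col source ((PySem.Dict.empty : PySem.Dict Int Int).getD (pvIdxA source num_col) 0) pvDeltas PySem.Set.empty PySem.Dict.empty).1 := by
      simp
    have hq1 : ∀ p ∈ ([] : List (List Int)) ++ (pvRef graph num_row num_col source ((PySem.Dict.empty : PySem.Dict Int Int).getD (pvIdxA source num_col) 0) pvDeltas PySem.Set.empty PySem.Dict.empty).1,
        (pvRef graph num_row num_col source ((PySem.Dict.empty : PySem.Dict Int Int).getD (pvIdxA source num_col) 0) pvDeltas PySem.Set.empty PySem.Dict.empty).2.2.contains (pvIdxA p num_col) = true := by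
      intro p hp
      rcases List.mem_append.mp hp with h | h
      · cases h
      · exact hpres.2.2.1 p h
    have hval1 : ∀ j, 0 ≤ (pvRef graph num_row num_col source ((PySem.Dict.empty : PySem.Dict Int Int).getD (pvIdxA source num_col) 0) pvDeltas PySem.Set.empty PySem.Dict.empty).2.2.getD j 0 := by
      refine hpres.2.2.2 ?_ ?_
      · simp [PySem.Dict.getD_empty]
      · intro j; simp [PySem.Dict.getD_empty]
    have hA := pvFoldA graph num_row num_col source ((PySem.Dict.empty : PySem.Dict Int Int).getD (pvIdxA source num_col) 0)
      pvDeltas [] PySem.Set.empty PySem.Dict.empty rfl (pvHK source num_row num_col graph)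
    by_cases htel : teleports.contains (pvIdxA source num_col) = true
    · have hmtd : (if teleports.contains (pvIdxA source num_col) && ((-1 : Int) == -1) then
          (if (PySem.Dict.empty : PySem.Dict Int Int).contains (pvIdxA source num_col) then (PySem.Dict.empty : PySem.Dict Int Int).getD (pvIdxA source num_col) 0 else 0) else (-1 : Int)) = 0 := by
        rw [htel]
        simp [PySem.Dict.contains_empty]
      simp only [pvLoopA, if_neg hst, hmtd]
      rw [pvLoopB_cons graph num_row num_col (num_row.toNat * num_col.toNat + 1) [source] 0 PySem.Set.empty PySem.Dict.empty source hgq]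
      rw [pvNeighboursA_eq, hA]
      rw [pvL2 source target graph teleports num_row num_col (num_row.toNat * num_col.toNat + 1)
        ([] ++ (pvRef graph num_row num_col source ((PySem.Dict.empty : PySem.Dict Int Int).getD (pvIdxA source num_col) 0) pvDeltas PySem.Set.empty PySem.Dict.empty).1)
        ([source] ++ (pvRef graph num_row num_col source ((PySem.Dict.empty : PySem.Dict Int Int).getD (pvIdxA source num_col) 0) pvDeltas PySem.Set.empty PySem.Dict.empty).1)
        (0+1)
        (pvRef graph num_row num_col source ((PySem.Dict.empty : PySem.Dict Int Int).getD (pvIdxA source num_col) 0) pvDeltas PySem.Set.empty PySem.Dict.empty).2.1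
        (pvRef graph num_row num_col source ((PySem.Dict.empty : PySem.Dict Int Int).getD (pvIdxA source num_col) 0) pvDeltas PySem.Set.empty PySem.Dict.empty).2.2
        0 (by decide) hrel1 hq1 hpres.2.1]
      cases hix : PySem.List.index? (pvLoopB graph num_row num_col (num_row.toNat * num_col.toNat + 1)
          ([source] ++ (pvRef graph num_row num_col source ((PySem.Dict.empty : PySem.Dict Int Int).getD (pvIdxA source num_col) 0) pvDeltas PySem.Set.empty PySem.Dict.empty).1) (0+1)
          (pvRef graph num_row num_col source ((PySem.Dict.empty : PySem.Dict Int Int).getD (pvIdxA source num_col) 0) pvDeltas PySem.Set.empty PySem.Dict.empty).2.1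
          (pvRef graph num_row num_col source ((PySem.Dict.empty : PySem.Dict Int Int).getD (pvIdxA source num_col) 0) pvDeltas PySem.Set.empty PySem.Dict.empty).2.2).1 target with
      | none =>
        rw [PySem.List.index?_cons_of_ne _ hne, hix]
        rfl
      | some k =>
        rw [PySem.List.index?_cons_of_ne _ hne, hix]
        simp only [Option.map_some]
        rw [List.take_succ_cons]
        rw [List.find?_cons_of_pos (by simpa using htel)]
        simp [pvIdxB_eq_pvIdxA]
    · have hmtd : (if teleports.contains (pvIdxA source num_col) && ((-1 : Int) == -1) then
          (if (PySem.Dict.empty : PySem.Dict Int Int).contains (pvIdxA source num_col) then (PySem.Dict.empty : PySem.Dict Int Int).getD (pvIdxA source num_col) 0 else 0) else (-1 : Int)) = -1 := by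
        rw [eq_false_of_ne_true htel]
        simp
      simp only [pvLoopA, if_neg hst, hmtd]
      rw [pvLoopB_cons graph num_row num_col (num_row.toNat * num_col.toNat + 1) [source] 0 PySem.Set.empty PySem.Dict.empty source hgq]
      rw [pvNeighboursA_eq, hA]
      rw [pvL1 source target graph teleports num_row num_col (num_row.toNat * num_col.toNat + 1)
        ([] ++ (pvRef graph num_row num_col source ((PySem.Dict.empty : PySem.Dict Int Int).getD (pvIdxA source num_col) 0) pvDeltas PySem.Set.empty PySem.Dict.empty).1)
        ([source] ++ (pvRef graph num_row num_col source ((PySem.Dict.empty : PySem.Dict Int Int).getD (pvIdxA source num_col) 0) pvDeltas PySem.Set.empty PySem.Dict.empty).1)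
        (0+1)
        (pvRef graph num_row num_col source ((PySem.Dict.empty : PySem.Dict Int Int).getD (pvIdxA source num_col) 0) pvDeltas PySem.Set.empty PySem.Dict.empty).2.1
        (pvRef graph num_row num_col source ((PySem.Dict.empty : PySem.Dict Int Int).getD (pvIdxA source num_col) 0) pvDeltas PySem.Set.empty PySem.Dict.empty).2.2
        (eq_false_of_ne_true htel) hrel1 hq1 hpres.2.1 hval1]
      cases hix : PySem.List.index? (pvLoopB graph num_row num_col (num_row.toNat * num_col.toNat + 1)
          ([source] ++ (pvRef graph num_row num_col source ((PySem.Dict.empty : PySem.Dict Int Int).getD (pvIdxA source num_col) 0) pvDeltas PySem.Set.empty PySem.Dict.empty).1) (0+1)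
          (pvRef graph num_row num_col source ((PySem.Dict.empty : PySem.Dict Int Int).getD (pvIdxA source num_col) 0) pvDeltas PySem.Set.empty PySem.Dict.empty).2.1
          (pvRef graph num_row num_col source ((PySem.Dict.empty : PySem.Dict Int Int).getD (pvIdxA source num_col) 0) pvDeltas PySem.Set.empty PySem.Dict.empty).2.2).1 target with
      | none =>
        simp only [pvPost, PySem.List.index?_cons_of_ne _ hne, hix]
        rfl
      | some k =>
        simp only [pvPost, PySem.List.index?_cons_of_ne _ hne, hix, Option.map_some]
        rw [List.take_succ_cons]
        rw [List.find?_cons_of_neg (by simpa using htel)]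
        simp [pvIdxB_eq_pvIdxA]
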